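-- pv_equiv track=rewrite | github.com/choibongseok/my-superagent | backend/app/api/v1/streaks.py | _level_from_achievements
-- ===== SOURCE A (Python) =====
-- _LEVEL_TITLES = [
--     (0, "Newcomer"),
--     (3, "Apprentice"),
--     (6, "Practitioner"),
--     (10, "Expert"),
--     (15, "Master"),
--     (20, "Grandmaster"),
--     (25, "Legend"),
-- ]
--
-- def _level_from_achievements(count: int) -> tuple[int, str]:
--     """Derive a level and title from number of achievements earned."""
--     level = 1
--     title = "Newcomer"
--     for threshold, t in _LEVEL_TITLES:
--         if count >= threshold:
--             level = threshold + 1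
--             title = t
--     return level, title
-- ===== SOURCE B (Python) =====
-- import bisect
--
-- _THRESHOLDS = [0, 3, 6, 10, 15, 20, 25]
-- _TITLES = ["Newcomer", "Apprentice", "Practitioner", "Expert",
--            "Master", "Grandmaster", "Legend"]
--
-- def _level_from_achievements(count: int) -> tuple[int, str]:
--     """Derive a level and title from number of achievements earned."""
--     idx = bisect.bisect_right(_THRESHOLDS, count)
--     if idx == 0:
--         return 1, "Newcomer"
--     return _THRESHOLDS[idx - 1] + 1, _TITLES[idx - 1]
-- ===== Notes on version B (the rewrite author's own statement) =====
-- stated objective: idiomatic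
-- what changed: Replaces the linear scan that keeps overwriting level/title with a bisect_right binary search over a sorted thresholds list and a parallel titles list, indexing the band directly.
import Mathlib
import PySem

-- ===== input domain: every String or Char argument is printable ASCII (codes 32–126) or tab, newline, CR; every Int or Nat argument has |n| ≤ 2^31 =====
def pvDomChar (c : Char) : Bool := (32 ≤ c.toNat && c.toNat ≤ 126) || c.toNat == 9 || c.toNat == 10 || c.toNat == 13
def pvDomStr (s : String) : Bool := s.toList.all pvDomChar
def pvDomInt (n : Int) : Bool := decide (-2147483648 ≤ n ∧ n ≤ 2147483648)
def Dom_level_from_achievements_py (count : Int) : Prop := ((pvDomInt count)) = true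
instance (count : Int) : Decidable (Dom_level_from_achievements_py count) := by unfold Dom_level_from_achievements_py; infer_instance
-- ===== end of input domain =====

-- B replaces A's linear scan-and-overwrite over the level table with a bisect_right
-- (binary search) over a sorted thresholds list plus a parallel titles list (idiomatic).


-- ===== PORT A =====
def pvLevelTitles : List (Int × String) :=
  [(0, "Newcomer"), (3, "Apprentice"), (6, "Practitioner"), (10, "Expert"),
   (15, "Master"), (20, "Grandmaster"), (25, "Legend")]

-- literal port of A: fold over the table, overwriting (level, title) whenever count ≥ threshold
def level_from_achievements_py (count : Int) : Int × String :=
  pvLevelTitles.foldl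
    (fun st p => if count ≥ p.1 then (p.1 + 1, p.2) else st)
    (1, "Newcomer")

-- ===== PORT B =====
def pvThresholds : List Int := [0, 3, 6, 10, 15, 20, 25]
def pvTitles : List String :=
  ["Newcomer", "Apprentice", "Practitioner", "Expert", "Master", "Grandmaster", "Legend"]

-- port of Python's bisect.bisect_right on a sorted list: number of elements ≤ x
-- (exact for sorted input, which pvThresholds is)
def pvBisectRight (ts : List Int) (x : Int) : Nat :=
  (ts.takeWhile (fun t => decide (t ≤ x))).length

def level_from_achievements_py_alt (count : Int) : Int × String :=
  let idx := pvBisectRight pvThresholds count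
  if idx = 0 then (1, "Newcomer")
  else (pvThresholds.getD (idx - 1) 0 + 1, pvTitles.getD (idx - 1) "")

-- ===== PRECONDITION & SPEC =====
def Spec_level_from_achievements_py (count : Int) (out : Int × String) : Prop := out = level_from_achievements_py_alt count
instance (count : Int) (out : Int × String) : Decidable (Spec_level_from_achievements_py count out) := by unfold Spec_level_from_achievements_py; infer_instance

-- ===== CLAIM (what is proved, stated in full; the proofs are below) =====
def Claim_equal_level_from_achievements_py : Prop := ∀ (count : Int), Dom_level_from_achievements_py count → Spec_level_from_achievements_py count (level_from_achievements_py count)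

-- ===== LEMMAS AND PROOFS =====

-- ===== VERDICT (by name: the statement is the Claim_ definition above) =====
theorem level_from_achievements_py_spec : Claim_equal_level_from_achievements_py := by
  intro count _
  unfold Spec_level_from_achievements_py level_from_achievements_py level_from_achievements_py_alt
    pvBisectRight pvLevelTitles pvThresholds pvTitles
  simp only [List.foldl, List.takeWhile]
  by_cases h0 : (0 : Int) ≤ count
  · by_cases h3 : (3 : Int) ≤ count
    · by_cases h6 : (6 : Int) ≤ count
      · by_cases h10 : (10 : Int) ≤ count
        · by_cases h15 : (15 : Int) ≤ count
          · by_cases h20 : (20 : Int) ≤ count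
            · by_cases h25 : (25 : Int) ≤ count
              · simp [h0, h3, h6, h10, h15, h20, h25]
              · simp [h0, h3, h6, h10, h15, h20, h25]
            · simp [h0, h3, h6, h10, h15, h20, (show ¬(25:Int) ≤ count by omega)]
          · simp [h0, h3, h6, h10, h15, (show ¬(20:Int) ≤ count by omega), (show ¬(25:Int) ≤ count by omega)]
        · simp [h0, h3, h6, h10, (show ¬(15:Int) ≤ count by omega), (show ¬(20:Int) ≤ count by omega), (show ¬(25:Int) ≤ count by omega)]
      · simp [h0, h3, h6, (show ¬(10:Int) ≤ count by omega), (show ¬(15:Int) ≤ count by omega), (show ¬(20:Int) ≤ count by omega), (show ¬(25:Int) ≤ count by omega)]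
    · simp [h0, h3, (show ¬(6:Int) ≤ count by omega), (show ¬(10:Int) ≤ count by omega), (show ¬(15:Int) ≤ count by omega), (show ¬(20:Int) ≤ count by omega), (show ¬(25:Int) ≤ count by omega)]
  · simp [h0, (show ¬(3:Int) ≤ count by omega), (show ¬(6:Int) ≤ count by omega), (show ¬(10:Int) ≤ count by omega), (show ¬(15:Int) ≤ count by omega), (show ¬(20:Int) ≤ count by omega), (show ¬(25:Int) ≤ count by omega)]
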